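-- pv_equiv track=rewrite | github.com/SebMenozzi/huffman | sebastien.menozzi_huffman.py | buildfrequencylist
-- ===== SOURCE A (Python) =====
-- def __initlist(n, val):
--     L = []
--     for i in range(n):
--         L.append(val)
--     return L
--
-- def __hist(s):
--     H = __initlist(256, 0)
--     for c in s:
--         H[ord(c)] += 1;
--     return H;
--
-- def buildfrequencylist(dataIN):
--     """
--     Builds a tuple list of the character frequencies in the input.
--     """
--     freq = []
--     H = __hist(dataIN);
--     i = 0;
--     for c in H:
--         if c != 0:
--             freq.append((c, chr(i)))
--         i += 1
--     return freq
-- ===== SOURCE B (Python) =====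
-- def buildfrequencylist(dataIN):
--     """
--     Builds a tuple list of the character frequencies in the input.
--     """
--     def runs(s):
--         if not s:
--             return []
--         c = s[0]
--         k = 1
--         while k < len(s) and s[k] == c:
--             k += 1
--         return [(k, c)] + runs(s[k:])
--     return runs(sorted(dataIN))
-- ===== Notes on version B (the rewrite author's own statement) =====
-- stated objective: alternative
-- what changed: Replaces the dense 256-slot histogram plus zero-skipping indexed scan by sort-then-run-length-encode: sort the characters, then recursively emit one (run length, char) pair per maximal run of equal characters.
import Mathlib
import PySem

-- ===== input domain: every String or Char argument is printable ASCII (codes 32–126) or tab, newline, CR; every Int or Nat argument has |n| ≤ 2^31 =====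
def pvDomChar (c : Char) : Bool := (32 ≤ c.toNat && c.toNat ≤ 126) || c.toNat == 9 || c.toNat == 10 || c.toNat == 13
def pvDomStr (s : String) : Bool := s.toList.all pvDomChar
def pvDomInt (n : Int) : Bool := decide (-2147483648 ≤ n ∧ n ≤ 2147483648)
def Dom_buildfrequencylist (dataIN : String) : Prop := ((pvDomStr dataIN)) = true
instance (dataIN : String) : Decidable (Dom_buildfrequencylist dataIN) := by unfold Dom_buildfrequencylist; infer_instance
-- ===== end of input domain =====

-- B replaces A's dense 256-slot histogram and zero-skipping indexed scan by
-- sort-then-run-length-encode: sort the characters, then recursively emit one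
-- (run length, char) pair per maximal run (alternative algorithm; proved equal
-- on the printable-ASCII domain).


-- ===== PORT A =====
-- __initlist(n, val): append val n times
def pvInitlist (n : Int) (val : Int) : List Int :=
  (PySem.List.pyRange 0 n 1).foldl (fun L _ => L ++ [val]) []

-- one step of __hist's loop body: H[ord(c)] += 1
def pvHistStep (H : List Int) (c : Char) : List Int :=
  PySem.List.pySetD H (c.toNat : Int) (PySem.List.pyGetD H (c.toNat : Int) 0 + 1)

-- __hist(s)
def pvHist (s : List Char) : List Int :=
  s.foldl pvHistStep (pvInitlist 256 0)

-- one step of buildfrequencylist's loop over H, state (freq, i); chr(i) is Char.ofNat i.toNat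
def pvOutStep (p : List (Int × String) × Int) (c : Int) : List (Int × String) × Int :=
  (if c ≠ 0 then p.1 ++ [(c, String.mk [Char.ofNat p.2.toNat])] else p.1, p.2 + 1)

def buildfrequencylist (dataIN : String) : List (Int × String) :=
  ((pvHist dataIN.toList).foldl pvOutStep ([], 0)).1

-- ===== PORT B =====
-- runs(s): the while loop counts k, the length of the maximal leading run of
-- s[0] (here 1 + takeWhile-length of the tail); recurse on s[k:] (the dropWhile)
def pvRuns : List Char → List (Int × String)
  | [] => []
  | c :: t =>
      ((1 + ((t.takeWhile (fun d => d == c)).length : Int)), String.mk [c])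
        :: pvRuns (t.dropWhile (fun d => d == c))
termination_by l => l.length
decreasing_by
  simp only [List.length_cons]
  exact Nat.lt_succ_of_le (List.length_dropWhile_le _ _)

def buildfrequencylist_alt (dataIN : String) : List (Int × String) :=
  pvRuns (PySem.List.sorted dataIN.toList (fun c => c) false)

-- ===== PRECONDITION & SPEC =====
def Spec_buildfrequencylist (dataIN : String) (out : List (Int × String)) : Prop := out = buildfrequencylist_alt dataIN
instance (dataIN : String) (out : List (Int × String)) : Decidable (Spec_buildfrequencylist dataIN out) := by unfold Spec_buildfrequencylist; infer_instance

-- ===== CLAIM (what is proved, stated in full; the proofs are below) =====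
def Claim_equal_buildfrequencylist : Prop := ∀ (dataIN : String), Dom_buildfrequencylist dataIN → Spec_buildfrequencylist dataIN (buildfrequencylist dataIN)

-- ===== LEMMAS AND PROOFS =====

theorem charToNat256 (i : Nat) (h : i < 256) : (Char.ofNat i).toNat = i := by
  rw [Char.toNat_ofNat, if_pos (Or.inl (by omega))]

theorem charOfNatLt (i j : Nat) (hij : i < j) (hj : j < 256) :
    Char.ofNat i < Char.ofNat j := by
  apply Char.lt_def.mpr
  apply UInt32.lt_iff_toNat_lt.mpr
  show (Char.ofNat i).toNat < (Char.ofNat j).toNat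
  rw [charToNat256 i (by omega), charToNat256 j hj]; exact hij

theorem charEqOfToNatEq {c d : Char} (h : c.toNat = d.toNat) : c = d := by
  rw [← Char.ofNat_toNat c, h, Char.ofNat_toNat]

set_option maxRecDepth 4096 in
theorem initlist256 : pvInitlist 256 0 = List.replicate 256 0 := by decide

theorem histStep_length (H : List Int) (c : Char) : (pvHistStep H c).length = H.length := by
  simp [pvHistStep]

theorem histFold_length (cs : List Char) : ∀ (H : List Int),
    (cs.foldl pvHistStep H).length = H.length := by
  induction cs with
  | nil => intro H; rfl
  | cons c t ih => intro H; rw [List.foldl_cons, ih, histStep_length]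

theorem histFold_getD (cs : List Char) : ∀ (H : List Int), H.length = 256 →
    (∀ c ∈ cs, c.toNat < 256) → ∀ i : Nat, i < 256 →
    PySem.List.pyGetD (cs.foldl pvHistStep H) (i : Int) 0
      = PySem.List.pyGetD H (i : Int) 0 + (cs.count (Char.ofNat i) : Int) := by
  induction cs with
  | nil => intro H _ _ i _; simp
  | cons c t ih =>
    intro H hlen hdom i hi
    rw [List.foldl_cons, ih (pvHistStep H c) (by rw [histStep_length]; exact hlen)
        (fun x hx => hdom x (List.mem_cons_of_mem _ hx)) i hi]
    have hc : c.toNat < 256 := hdom c (List.mem_cons_self)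
    have hset : PySem.List.pyGetD (pvHistStep H c) (i : Int) 0
        = if i = c.toNat then PySem.List.pyGetD H (i : Int) 0 + 1
          else PySem.List.pyGetD H (i : Int) 0 := by
      rw [pvHistStep, PySem.List.pyGetD_pySetD_natCast H c.toNat i _ 0 (by omega)]
      by_cases h : i = c.toNat
      · rw [if_pos h, if_pos h, h]
      · rw [if_neg h, if_neg h]
    rw [hset, List.count_cons]
    by_cases h : i = c.toNat
    · have hce : c = Char.ofNat i := by
        apply charEqOfToNatEq; rw [charToNat256 i hi]; omega
      rw [if_pos h, if_pos (by simp [hce])]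
      push_cast; ring
    · have hcne : ¬ (Char.ofNat i = c) := by
        intro he
        apply h; rw [← he, charToNat256 i hi]
      rw [if_neg h, if_neg (by simp; exact fun he => hcne he.symm)]
      push_cast; ring

-- the histogram is the dense count table
set_option maxRecDepth 8192 in
theorem hist_eq (cs : List Char) (hdom : ∀ c ∈ cs, c.toNat < 256) :
    pvHist cs = (List.range 256).map (fun i => (cs.count (Char.ofNat i) : Int)) := by
  have hlen : (pvHist cs).length = 256 := by
    rw [pvHist, histFold_length, initlist256, List.length_replicate]
  apply List.ext_getElem
  · rw [hlen, List.length_map, List.length_range]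
  · intro i h1 h2
    have hi : i < 256 := by rwa [hlen] at h1
    have hg := histFold_getD cs (pvInitlist 256 0)
        (by rw [initlist256, List.length_replicate]) hdom i hi
    have hL : PySem.List.pyGetD (pvHist cs) (i : Int) 0 = (pvHist cs)[i] := by
      rw [PySem.List.pyGetD_natCast]
      exact List.getD_eq_getElem _ _ h1
    have hinit : PySem.List.pyGetD (pvInitlist 256 0) (i : Int) 0 = 0 := by
      rw [PySem.List.pyGetD_natCast, initlist256]
      rw [List.getD_eq_getElem _ _ (by rw [List.length_replicate]; exact hi)]
      exact List.getElem_replicate _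
    rw [← hL]
    unfold pvHist
    rw [hg, hinit, zero_add]
    rw [List.getElem_map, List.getElem_range]

-- [f(i) for i if p(i)] as a filterMap: skipping zeros is filtering
theorem filterMap_ite {α β : Type} (p : α → Bool) (g : α → β) (l : List α) :
    l.filterMap (fun i => if p i then some (g i) else none) = (l.filter p).map g := by
  induction l with
  | nil => rfl
  | cons x t ih => by_cases h : p x <;> simp [h, ih]

-- the output loop over a mapped range produces the corresponding filterMap
theorem loopA (f : Nat → Int) : ∀ (b a : Nat) (acc : List (Int × String)),
    (((List.range' a b).map f).foldl pvOutStep (acc, (a : Int))).1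
      = acc ++ (List.range' a b).filterMap
          (fun i => if f i ≠ 0 then some (f i, String.mk [Char.ofNat i]) else none) := by
  intro b
  induction b with
  | zero => intro a acc; simp
  | succ n ih =>
    intro a acc
    rw [List.range'_succ, List.map_cons, List.foldl_cons, List.filterMap_cons]
    have hstep : pvOutStep (acc, (a : Int)) (f a)
        = (if f a ≠ 0 then acc ++ [(f a, String.mk [Char.ofNat a])] else acc,
           ((a + 1 : Nat) : Int)) := by
      simp only [pvOutStep, Int.toNat_natCast, Prod.mk.injEq]
      exact ⟨trivial, by push_cast; ring⟩
    rw [hstep]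
    by_cases h : f a ≠ 0
    · rw [if_pos h, if_pos h, ih (a + 1) (acc ++ [(f a, String.mk [Char.ofNat a])])]
      simp
    · rw [if_neg h, if_neg h, ih (a + 1) acc]

-- A's result in closed form: the present character codes in increasing order, mapped
theorem portA_eq (cs : List Char) (hdom : ∀ c ∈ cs, c.toNat < 256) :
    ((pvHist cs).foldl pvOutStep ([], 0)).1
      = (((List.range 256).filter
            (fun i => decide (cs.count (Char.ofNat i) ≠ 0))).map Char.ofNat).map
          (fun c => ((cs.count c : Int), String.mk [c])) := by
  rw [hist_eq cs hdom, List.range_eq_range']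
  have h0 : (0 : Int) = ((0 : Nat) : Int) := rfl
  rw [h0, loopA (fun i => (cs.count (Char.ofNat i) : Int)) 256 0 [], List.nil_append]
  rw [List.map_map]
  rw [show (fun i => if (cs.count (Char.ofNat i) : Int) ≠ 0
        then some ((cs.count (Char.ofNat i) : Int), String.mk [Char.ofNat i]) else none)
      = (fun i => if decide (cs.count (Char.ofNat i) ≠ 0)
        then some ((cs.count (Char.ofNat i) : Int), String.mk [Char.ofNat i]) else none) by
    funext i
    by_cases h : cs.count (Char.ofNat i) ≠ 0
    · rw [if_pos (by exact_mod_cast h), if_pos (by simpa using h)]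
    · rw [if_neg (by exact_mod_cast h), if_neg (by simpa using h)]]
  rw [filterMap_ite (fun i => decide (cs.count (Char.ofNat i) ≠ 0))
      (fun i => ((cs.count (Char.ofNat i) : Int), String.mk [Char.ofNat i]))]
  rw [← List.range_eq_range']
  rfl

-- the present character codes, in increasing order, mapped to chars
theorem presentChars_pairwise (cs : List Char) :
    (((List.range 256).filter
        (fun i => decide (cs.count (Char.ofNat i) ≠ 0))).map Char.ofNat).Pairwise (· < ·) := by
  have h1 : (((List.range 256).filter
      (fun i => decide (cs.count (Char.ofNat i) ≠ 0)))).Pairwise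
        (fun a b => Char.ofNat a < Char.ofNat b) := by
    apply List.Pairwise.imp_of_mem
      (fun {a b} _ hb hab => charOfNatLt a b hab
        (List.mem_range.mp (List.mem_of_mem_filter hb)))
    exact List.Pairwise.filter _ List.pairwise_lt_range
  exact List.Pairwise.map Char.ofNat (fun _ _ h => h) h1

-- ----- B-side lemmas: run-length encoding of a sorted list -----

-- the run heads (one representative per maximal run)
def pvHeads : List Char → List Char
  | [] => []
  | c :: t => c :: pvHeads (t.dropWhile (fun d => d == c))
termination_by l => l.length
decreasing_by
  simp only [List.length_cons]
  exact Nat.lt_succ_of_le (List.length_dropWhile_le _ _)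

theorem heads_subset : ∀ (l : List Char), ∀ x ∈ pvHeads l, x ∈ l := by
  intro l
  induction l using pvHeads.induct with
  | case1 => intro x hx; rw [pvHeads] at hx; cases hx
  | case2 c t ih =>
    intro x hx
    rw [pvHeads] at hx
    rcases List.mem_cons.mp hx with h | h
    · exact h ▸ List.mem_cons_self
    · exact List.mem_cons_of_mem _
        ((List.dropWhile_sublist _).subset (ih x h))

-- in a sorted list c :: t, everything after the leading run of c is > c
theorem dropWhile_gt (c : Char) : ∀ (t : List Char),
    (c :: t).Pairwise (· ≤ ·) →
    ∀ x ∈ t.dropWhile (fun d => d == c), c < x := by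
  intro t
  induction t with
  | nil => intro _ x hx; cases hx
  | cons d r ih =>
    intro hp x hx
    by_cases hd : (d == c) = true
    · rw [List.dropWhile_cons, if_pos hd] at hx
      have hcr : (c :: r).Pairwise (· ≤ ·) :=
        hp.sublist (List.cons_sublist_cons.mpr (List.sublist_cons_self d r))
      exact ih hcr x hx
    · rw [List.dropWhile_cons, if_neg hd] at hx
      have hcd : c ≤ d := (List.pairwise_cons.mp hp).1 d List.mem_cons_self
      have hcdlt : c < d := lt_of_le_of_ne hcd (fun h => hd (by simp [h.symm]))
      rcases List.mem_cons.mp hx with h | h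
      · exact h ▸ hcdlt
      · have hdr : (d :: r).Pairwise (· ≤ ·) := (List.pairwise_cons.mp hp).2
        exact lt_of_lt_of_le hcdlt ((List.pairwise_cons.mp hdr).1 x h)

theorem takeWhile_count (c : Char) (t : List Char) :
    (t.takeWhile (fun d => d == c)).count c = (t.takeWhile (fun d => d == c)).length := by
  rw [List.count_eq_length]
  intro b hb
  have hb2 : b = c := by simpa using List.mem_takeWhile_imp hb
  exact hb2.symm

theorem sorted_head_count (c : Char) (t : List Char) (hp : (c :: t).Pairwise (· ≤ ·)) :
    (c :: t).count c = 1 + (t.takeWhile (fun d => d == c)).length := by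
  have hsplit : t = t.takeWhile (fun d => d == c) ++ t.dropWhile (fun d => d == c) :=
    (List.takeWhile_append_dropWhile).symm
  have hdrop : (t.dropWhile (fun d => d == c)).count c = 0 := by
    rw [List.count_eq_zero]
    intro hmem
    exact absurd rfl (ne_of_gt (dropWhile_gt c t hp c hmem))
  rw [List.count_cons_self]
  calc t.count c + 1
      = ((t.takeWhile (fun d => d == c)).count c +
          (t.dropWhile (fun d => d == c)).count c) + 1 := by
        rw [← List.count_append, ← hsplit]
    _ = 1 + (t.takeWhile (fun d => d == c)).length := by
        rw [takeWhile_count, hdrop]; omega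

theorem sorted_head_count_other (c x : Char) (t : List Char) (hx : x ≠ c) :
    (c :: t).count x = (t.dropWhile (fun d => d == c)).count x := by
  have hsplit : t = t.takeWhile (fun d => d == c) ++ t.dropWhile (fun d => d == c) :=
    (List.takeWhile_append_dropWhile).symm
  have htake : (t.takeWhile (fun d => d == c)).count x = 0 := by
    rw [List.count_eq_zero]
    intro hmem
    exact hx (by simpa using List.mem_takeWhile_imp hmem)
  calc (c :: t).count x = t.count x := by
        rw [List.count_cons, if_neg (by simp [Ne.symm hx]), add_zero]
    _ = (t.dropWhile (fun d => d == c)).count x := by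
        conv_lhs => rw [hsplit]
        rw [List.count_append, htake, zero_add]

-- run-length encoding of a sorted list, in closed form
theorem runs_eq : ∀ (s : List Char), s.Pairwise (· ≤ ·) →
    pvRuns s = (pvHeads s).map (fun c => ((s.count c : Int), String.mk [c])) := by
  intro s
  induction s using pvRuns.induct with
  | case1 => intro _; rw [pvRuns, pvHeads]; rfl
  | case2 c t ih =>
    intro hp
    have hp2 : (t.dropWhile (fun d => d == c)).Pairwise (· ≤ ·) :=
      (List.pairwise_cons.mp hp).2.sublist (List.dropWhile_sublist _)
    rw [pvRuns, pvHeads, List.map_cons, ih hp2]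
    congr 1
    · rw [sorted_head_count c t hp]; push_cast; ring_nf
    · apply List.map_congr_left
      intro x hx
      have hxt2 : x ∈ t.dropWhile (fun d => d == c) := heads_subset _ x hx
      have hxc : x ≠ c := ne_of_gt (dropWhile_gt c t hp x hxt2)
      rw [sorted_head_count_other c x t hxc]

theorem heads_pairwise_lt : ∀ (s : List Char), s.Pairwise (· ≤ ·) →
    (pvHeads s).Pairwise (· < ·) := by
  intro s
  induction s using pvHeads.induct with
  | case1 => intro _; rw [pvHeads]; exact List.Pairwise.nil
  | case2 c t ih =>
    intro hp
    have hp2 : (t.dropWhile (fun d => d == c)).Pairwise (· ≤ ·) :=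
      (List.pairwise_cons.mp hp).2.sublist (List.dropWhile_sublist _)
    rw [pvHeads]
    apply List.pairwise_cons.mpr
    refine ⟨fun x hx => dropWhile_gt c t hp x (heads_subset _ x hx), ih hp2⟩

theorem heads_mem : ∀ (s : List Char), ∀ x, x ∈ pvHeads s ↔ x ∈ s := by
  intro s
  induction s using pvHeads.induct with
  | case1 => intro x; simp [pvHeads]
  | case2 c t ih =>
    intro x
    constructor
    · exact fun h => heads_subset _ x h
    · intro h
      rw [pvHeads]
      rcases List.mem_cons.mp h with h | h
      · exact h ▸ List.mem_cons_self
      · by_cases hxc : x = c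
        · exact hxc ▸ List.mem_cons_self
        · apply List.mem_cons_of_mem
          apply (ih x).mpr
          have hsplit : t = t.takeWhile (fun d => d == c) ++ t.dropWhile (fun d => d == c) :=
            (List.takeWhile_append_dropWhile).symm
          rcases List.mem_append.mp (hsplit ▸ h) with h1 | h2
          · exact absurd (by simpa using List.mem_takeWhile_imp h1) hxc
          · exact h2

-- sorted(set(cs)) IS the increasing list of present character codes
theorem sorted_set_eq (cs : List Char) (hdom : ∀ c ∈ cs, c.toNat < 256) :
    PySem.List.sorted (PySem.Set.ofList cs) (fun c => c) false
      = ((List.range 256).filter (fun i => decide (cs.count (Char.ofNat i) ≠ 0))).map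
          Char.ofNat := by
  apply PySem.List.sorted_eq_of_perm_of_pairwise_lt
  · refine (List.perm_ext_iff_of_nodup
      ((presentChars_pairwise cs).imp (fun h => ne_of_lt h))
      (PySem.Set.nodup_ofList cs)).mpr ?_
    intro c
    constructor
    · intro hc
      obtain ⟨i, hi, rfl⟩ := List.mem_map.mp hc
      have hcount : cs.count (Char.ofNat i) ≠ 0 := by
        simpa using List.of_mem_filter hi
      exact (PySem.Set.mem_ofList cs _).mpr
        (List.count_pos_iff.mp (Nat.pos_of_ne_zero hcount))
    · intro hc
      have hmem : c ∈ cs := (PySem.Set.mem_ofList cs c).mp hc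
      apply List.mem_map.mpr
      refine ⟨c.toNat, List.mem_filter.mpr ⟨List.mem_range.mpr (hdom c hmem), ?_⟩,
        Char.ofNat_toNat c⟩
      simp only [Char.ofNat_toNat, decide_eq_true_eq]
      exact Nat.pos_iff_ne_zero.mp (List.count_pos_iff.mpr hmem)
  · exact presentChars_pairwise cs

-- the run heads of sorted(cs) are sorted(set(cs))
theorem heads_sorted_eq (cs : List Char) :
    pvHeads (PySem.List.sorted cs (fun c => c) false)
      = PySem.List.sorted (PySem.Set.ofList cs) (fun c => c) false := by
  set s := PySem.List.sorted cs (fun c => c) false with hs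
  have hp : s.Pairwise (· ≤ ·) := PySem.List.sorted_pairwise cs (fun c => c)
  symm
  apply PySem.List.sorted_eq_of_perm_of_pairwise_lt
  · refine (List.perm_ext_iff_of_nodup
      (((heads_pairwise_lt s hp)).imp (fun h => ne_of_lt h))
      (PySem.Set.nodup_ofList cs)).mpr ?_
    intro x
    rw [heads_mem s x, PySem.Set.mem_ofList]
    rw [hs, PySem.List.mem_sorted]
  · exact heads_pairwise_lt s hp

-- ===== VERDICT (by name: the statement is the Claim_ definition above) =====
theorem buildfrequencylist_spec : Claim_equal_buildfrequencylist := by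
  intro dataIN hdom
  unfold Dom_buildfrequencylist pvDomStr at hdom
  unfold Spec_buildfrequencylist buildfrequencylist buildfrequencylist_alt
  set cs := dataIN.toList with hcs
  have hdom' : ∀ c ∈ cs, c.toNat < 256 := by
    intro c hc
    have := List.all_eq_true.mp hdom c hc
    simp only [pvDomChar, Bool.or_eq_true, Bool.and_eq_true, decide_eq_true_eq,
      beq_iff_eq] at this
    omega
  set s := PySem.List.sorted cs (fun c => c) false with hs
  have hp : s.Pairwise (· ≤ ·) := PySem.List.sorted_pairwise cs (fun c => c)
  have hperm : s.Perm cs := PySem.List.sorted_perm cs (fun c => c) false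
  rw [runs_eq s hp, heads_sorted_eq cs, sorted_set_eq cs hdom', portA_eq cs hdom']
  apply List.map_congr_left
  intro c hc
  rw [hperm.count_eq]
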